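-- pv_equiv track=rewrite | github.com/tohmakobayashi1016/RL-StringOp | Edited examples/Playground.py | count_non_overlapping_a_pairs
-- ===== SOURCE A (Python) =====
-- def count_non_overlapping_a_pairs(string):
--     """
--     Count the number of valid non-overlapping pairs of 'a' characters in a string.
--     A valid pair consists of any two 'a' characters, either adjacent or separated
--     by any number of characters, but once a pair is found, those positions are ignored.
--
--     Args:
--     string (str): The input string.
--
--     Returns:
--     int: The number of valid non-overlapping 'a' pairs.
--     """
--     # Find all positions of 'a' characters in the string
--     a_positions = [i for i, char in enumerate(string) if char == 'a']
--
--     # Count non-overlapping pairs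
--     count = 0
--     i = 0
--     while i < len(a_positions) - 1:
--         # If we find a valid pair, we skip the next position (non-overlapping)
--         count += 1
--         i += 2  # Move by 2 to ensure we don't overlap the pair
--
--     return count
-- ===== SOURCE B (Python) =====
-- def count_non_overlapping_a_pairs(string):
--     count = 0
--     pending = False
--     for ch in string:
--         if ch == 'a':
--             if pending:
--                 count += 1
--                 pending = False
--             else:
--                 pending = True
--     return count
-- ===== Notes on version B (the rewrite author's own statement) =====
-- stated objective: simpler
-- what changed: Replaced the positions-list build plus step-by-2 while loop with a single pass over the characters maintaining a boolean pending flag that completes a pair on every second occurrence of the target character.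
import Mathlib
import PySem

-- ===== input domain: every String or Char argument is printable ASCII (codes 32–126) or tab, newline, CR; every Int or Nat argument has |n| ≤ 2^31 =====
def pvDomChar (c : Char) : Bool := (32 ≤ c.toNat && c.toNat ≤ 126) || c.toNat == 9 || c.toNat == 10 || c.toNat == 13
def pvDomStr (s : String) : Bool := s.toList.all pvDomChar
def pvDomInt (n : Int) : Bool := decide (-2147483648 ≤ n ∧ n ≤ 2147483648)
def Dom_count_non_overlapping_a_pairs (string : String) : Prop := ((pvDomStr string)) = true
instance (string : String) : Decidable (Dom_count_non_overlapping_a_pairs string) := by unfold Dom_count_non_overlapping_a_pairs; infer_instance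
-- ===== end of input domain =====

-- B replaces A's positions-list build + step-by-2 while loop with one pass keeping a boolean 'pending' flag (simpler decomposition, same cost).

-- ===== PORT A =====
-- the while loop: while i < len(a_positions) - 1: count += 1; i += 2
def pvLoopA (n i : Nat) (count : Int) : Int :=
  if i + 1 < n then pvLoopA n (i + 2) (count + 1) else count
termination_by n - i

def count_non_overlapping_a_pairs (string : String) : Int :=
  let a_positions := ((PySem.List.enumerate string.toList).filter (fun p => p.2 == 'a')).map Prod.fst
  pvLoopA a_positions.length 0 0

-- ===== PORT B =====
def pvStepB (st : Int × Bool) (ch : Char) : Int × Bool :=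
  if ch == 'a' then
    if st.2 then (st.1 + 1, false) else (st.1, true)
  else st

def count_non_overlapping_a_pairs_alt (string : String) : Int :=
  (string.toList.foldl pvStepB (0, false)).1

-- ===== PRECONDITION & SPEC =====
def Spec_count_non_overlapping_a_pairs (string : String) (out : Int) : Prop := out = count_non_overlapping_a_pairs_alt string
instance (string : String) (out : Int) : Decidable (Spec_count_non_overlapping_a_pairs string out) := by unfold Spec_count_non_overlapping_a_pairs; infer_instance

-- ===== CLAIM (what is proved, stated in full; the proofs are below) =====
def Claim_equal_count_non_overlapping_a_pairs : Prop := ∀ (string : String), Dom_count_non_overlapping_a_pairs string → Spec_count_non_overlapping_a_pairs string (count_non_overlapping_a_pairs string)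

-- ===== LEMMAS AND PROOFS =====

theorem pvLoopA_eq (n i : Nat) (c : Int) : pvLoopA n i c = c + ((n - i) / 2 : Nat) := by
  fun_induction pvLoopA n i c with
  | case1 i c h ih =>
      rw [ih]
      have h2 : (n - i) / 2 = (n - (i + 2)) / 2 + 1 := by omega
      rw [h2]; push_cast; ring
  | case2 i c h =>
      have h0 : (n - i) / 2 = 0 := by omega
      simp [h0]

theorem pvFoldB_eq (l : List Char) (c : Int) (p : Bool) :
    (l.foldl pvStepB (c, p)).1 = c + ((l.count 'a' + (if p then 1 else 0)) / 2 : Nat) := by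
  induction l generalizing c p with
  | nil => cases p <;> simp
  | cons ch t ih =>
      by_cases hch : ch = 'a'
      · subst hch
        cases p with
        | false =>
            simp only [List.foldl_cons, pvStepB]
            rw [ih]
            simp
        | true =>
            simp only [List.foldl_cons, pvStepB]
            rw [ih]
            have h2 : (t.count 'a' + 1 + 1) / 2 = t.count 'a' / 2 + 1 := by omega
            simp only [List.count_cons, beq_self_eq_true]
            push_cast [h2]
            omega
      · simp only [List.foldl_cons, pvStepB, beq_iff_eq, if_neg hch]
        rw [ih]
        simp [hch]

theorem pvPositions_length (l : List Char) (s : Int) :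
    (((PySem.List.enumerate l s).filter (fun p => p.2 == 'a')).map Prod.fst).length = l.count 'a' := by
  induction l generalizing s with
  | nil => simp [PySem.List.enumerate_nil]
  | cons ch t ih =>
      rw [PySem.List.enumerate_cons]
      by_cases hch : ch = 'a'
      · subst hch; simp [ih]
      · simp [hch, ih]

-- ===== VERDICT (by name: the statement is the Claim_ definition above) =====
theorem count_non_overlapping_a_pairs_spec : Claim_equal_count_non_overlapping_a_pairs := by
  intro s _
  unfold Spec_count_non_overlapping_a_pairs count_non_overlapping_a_pairs count_non_overlapping_a_pairs_alt
  rw [pvLoopA_eq, pvFoldB_eq, pvPositions_length]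
  simp
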